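-- pv_equiv track=rewrite | github.com/ShinX22/PharmaGaurd | services/json_builder.py | determine_overall_risk
-- ===== SOURCE A (Python) =====
-- VALID_RISK_LABELS = {"Safe", "Adjust Dosage", "Toxic", "Ineffective", "Unknown"}
--
-- VALID_SEVERITY_LEVELS = {"none", "low", "moderate", "high", "critical"}
--
-- def validate_risk_label(value):
--     if value in VALID_RISK_LABELS:
--         return value
--     return "Unknown"
--
-- def validate_severity(value):
--     if value in VALID_SEVERITY_LEVELS:
--         return value
--     return "none"
--
-- def determine_overall_risk(drug_results):
--     has_toxic = False
--     has_adjust = False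
--     max_severity = 0
--     severity_map = {"none": 0, "low": 1, "moderate": 2, "high": 3, "critical": 4}
--
--     for result in drug_results:
--         risk_label = validate_risk_label(result.get("risk_label", ""))
--         sev = validate_severity(result.get("severity", "none"))
--
--         if risk_label == "Toxic":
--             has_toxic = True
--         elif risk_label == "Adjust Dosage":
--             has_adjust = True
--
--         if sev in severity_map:
--             max_severity = max(max_severity, severity_map[sev])
--
--     severity_labels = {0: "none", 1: "low", 2: "moderate", 3: "high", 4: "critical"}
--
--     if has_toxic:
--         return {
--             "overall_risk_label": "Toxic",
--             "overall_severity": "high"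
--         }
--     elif has_adjust:
--         return {
--             "overall_risk_label": "Adjust Dosage",
--             "overall_severity": severity_labels.get(max_severity, "moderate")
--         }
--     else:
--         return {
--             "overall_risk_label": "Safe",
--             "overall_severity": severity_labels.get(max_severity, "low")
--         }
-- ===== SOURCE B (Python) =====
-- def determine_overall_risk(drug_results):
--     SEV = ["none", "low", "moderate", "high", "critical"]
--
--     def rank(label):
--         return 2 if label == "Toxic" else (1 if label == "Adjust Dosage" else 0)
--
--     def summary(result):
--         label = result.get("risk_label", "")
--         if label == "Toxic":
--             return {"overall_risk_label": "Toxic", "overall_severity": "high"}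
--         s = result.get("severity", "none")
--         sev = s if s in SEV else "none"
--         lab = "Adjust Dosage" if label == "Adjust Dosage" else "Safe"
--         return {"overall_risk_label": lab, "overall_severity": sev}
--
--     def merge(x, y):
--         xl, yl = x["overall_risk_label"], y["overall_risk_label"]
--         lab = xl if rank(xl) >= rank(yl) else yl
--         if lab == "Toxic":
--             return {"overall_risk_label": "Toxic", "overall_severity": "high"}
--         xs, ys = x["overall_severity"], y["overall_severity"]
--         sev = xs if SEV.index(xs) >= SEV.index(ys) else ys
--         return {"overall_risk_label": lab, "overall_severity": sev}
--
--     def solve(chunk):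
--         if len(chunk) == 1:
--             return summary(chunk[0])
--         mid = len(chunk) // 2
--         return merge(solve(chunk[:mid]), solve(chunk[mid:]))
--
--     if not drug_results:
--         return {"overall_risk_label": "Safe", "overall_severity": "none"}
--     return solve(drug_results)
-- ===== Notes on version B (the rewrite author's own statement) =====
-- stated objective: alternative
-- what changed: A's single flat loop threading three accumulators is replaced by a map/combine divide-and-conquer: each result is mapped to its own one-drug summary dict, and summaries are merged pairwise (worst label by rank, max severity by index, Toxic forcing 'high') over a balanced recursive split; the empty input returns the unit summary directly.
import Mathlib
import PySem

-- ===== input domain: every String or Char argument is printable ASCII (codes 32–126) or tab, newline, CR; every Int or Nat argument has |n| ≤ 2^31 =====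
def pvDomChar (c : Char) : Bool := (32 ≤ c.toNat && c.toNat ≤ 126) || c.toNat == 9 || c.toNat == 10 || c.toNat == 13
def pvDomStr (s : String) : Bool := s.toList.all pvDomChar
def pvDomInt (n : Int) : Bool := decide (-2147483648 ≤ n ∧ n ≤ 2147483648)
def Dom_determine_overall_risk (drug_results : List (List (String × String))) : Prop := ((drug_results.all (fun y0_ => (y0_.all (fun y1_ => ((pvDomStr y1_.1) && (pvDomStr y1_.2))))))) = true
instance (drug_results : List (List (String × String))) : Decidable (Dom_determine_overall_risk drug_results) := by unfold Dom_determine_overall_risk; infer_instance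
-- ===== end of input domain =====

-- One honest line: B replaces A's single accumulating loop by a divide-and-conquer
-- over per-result summary dicts merged with an associative "worst of two" combine;
-- objective: alternative (same result, different algorithmic structure).

-- shared primitive: Python's result.get(k, d) on an association list (first match)
def dictGetD (r : List (String × String)) (k d : String) : String :=
  match r.find? (fun p => p.1 == k) with
  | some p => p.2
  | none => d

-- ===== PORT A =====
def VALID_RISK_LABELS : PySem.Set String :=
  PySem.Set.ofList ["Safe", "Adjust Dosage", "Toxic", "Ineffective", "Unknown"]

def VALID_SEVERITY_LEVELS : PySem.Set String :=
  PySem.Set.ofList ["none", "low", "moderate", "high", "critical"]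

def validate_risk_label (value : String) : String :=
  if PySem.Set.contains VALID_RISK_LABELS value then value else "Unknown"

def validate_severity (value : String) : String :=
  if PySem.Set.contains VALID_SEVERITY_LEVELS value then value else "none"

def severity_map_A : PySem.Dict String Int :=
  PySem.Dict.ofList [("none", 0), ("low", 1), ("moderate", 2), ("high", 3), ("critical", 4)]

def severity_labels_A : PySem.Dict Int String :=
  PySem.Dict.ofList [(0, "none"), (1, "low"), (2, "moderate"), (3, "high"), (4, "critical")]

def determine_overall_risk (drug_results : List (List (String × String))) : List (String × String) :=
  let st := drug_results.foldl (fun (st : Bool × Bool × Int) result =>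
    let risk_label := validate_risk_label (dictGetD result "risk_label" "")
    let sev := validate_severity (dictGetD result "severity" "none")
    let st :=
      if risk_label == "Toxic" then (true, st.2.1, st.2.2)
      else if risk_label == "Adjust Dosage" then (st.1, true, st.2.2)
      else st
    if PySem.Dict.contains severity_map_A sev then
      (st.1, st.2.1, max st.2.2 (PySem.Dict.getD severity_map_A sev 0))
    else st) (false, false, 0)
  if st.1 then
    [("overall_risk_label", "Toxic"), ("overall_severity", "high")]
  else if st.2.1 then
    [("overall_risk_label", "Adjust Dosage"),
     ("overall_severity", PySem.Dict.getD severity_labels_A st.2.2 "moderate")]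
  else
    [("overall_risk_label", "Safe"),
     ("overall_severity", PySem.Dict.getD severity_labels_A st.2.2 "low")]

-- ===== PORT B =====
def SEV_B : List String := ["none", "low", "moderate", "high", "critical"]

def rank_B (label : String) : Int :=
  if label == "Toxic" then 2 else if label == "Adjust Dosage" then 1 else 0

def summary_B (result : List (String × String)) : List (String × String) :=
  let label := dictGetD result "risk_label" ""
  if label == "Toxic" then
    [("overall_risk_label", "Toxic"), ("overall_severity", "high")]
  else
    let s := dictGetD result "severity" "none"
    let sev := if SEV_B.contains s then s else "none"
    let lab := if label == "Adjust Dosage" then "Adjust Dosage" else "Safe"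
    [("overall_risk_label", lab), ("overall_severity", sev)]

def merge_B (x y : List (String × String)) : List (String × String) :=
  -- x["k"] / SEV.index(v): the keys and severity names are always present in the
  -- summaries merge is called on, so getD-with-default is exact here
  let xl := dictGetD x "overall_risk_label" ""
  let yl := dictGetD y "overall_risk_label" ""
  let lab := if rank_B xl ≥ rank_B yl then xl else yl
  if lab == "Toxic" then
    [("overall_risk_label", "Toxic"), ("overall_severity", "high")]
  else
    let xs := dictGetD x "overall_severity" ""
    let ys := dictGetD y "overall_severity" ""
    let sev := if (PySem.List.index? SEV_B xs).getD 0 ≥ (PySem.List.index? SEV_B ys).getD 0 then xs else ys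
    [("overall_risk_label", lab), ("overall_severity", sev)]

def solve_B (chunk : List (List (String × String))) : List (String × String) :=
  match chunk with
  | [] => [("overall_risk_label", "Safe"), ("overall_severity", "none")]  -- unreachable (solve is only called on nonempty chunks); totality guard
  | [r] => summary_B r
  | r1 :: r2 :: rest =>
      let c := r1 :: r2 :: rest
      let mid := c.length / 2
      merge_B (solve_B (c.take mid)) (solve_B (c.drop mid))
termination_by chunk.length
decreasing_by
  · simp [List.length_take]; omega
  · simp [List.length_drop]; omega

def determine_overall_risk_alt (drug_results : List (List (String × String))) : List (String × String) :=
  if drug_results.isEmpty then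
    [("overall_risk_label", "Safe"), ("overall_severity", "none")]
  else solve_B drug_results

-- ===== PRECONDITION & SPEC =====
def Spec_determine_overall_risk (drug_results : List (List (String × String))) (out : List (String × String)) : Prop := out = determine_overall_risk_alt drug_results
instance (drug_results : List (List (String × String))) (out : List (String × String)) : Decidable (Spec_determine_overall_risk drug_results out) := by unfold Spec_determine_overall_risk; infer_instance

-- ===== CLAIM (what is proved, stated in full; the proofs are below) =====
def Claim_equal_determine_overall_risk : Prop := ∀ (drug_results : List (List (String × String))), Dom_determine_overall_risk drug_results → Spec_determine_overall_risk drug_results (determine_overall_risk drug_results)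

-- ===== LEMMAS AND PROOFS =====

-- canonical summary triple: toxic flag, adjust flag, per-result severity code
def isTox (r : List (String × String)) : Bool := dictGetD r "risk_label" "" == "Toxic"
def isAdj (r : List (String × String)) : Bool := dictGetD r "risk_label" "" == "Adjust Dosage"
def sevCode (r : List (String × String)) : Int :=
  (PySem.List.index? SEV_B (if SEV_B.contains (dictGetD r "severity" "none") then dictGetD r "severity" "none" else "none")).getD 0

def toxL (l : List (List (String × String))) : Bool := l.any isTox
def adjL (l : List (List (String × String))) : Bool := l.any isAdj
def mcL (l : List (List (String × String))) : Int := (l.map sevCode).foldl max 0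

def sevName (m : Int) : String := (PySem.List.pyGet? SEV_B m).getD ""

def render (t a : Bool) (m : Int) : List (String × String) :=
  if t then [("overall_risk_label", "Toxic"), ("overall_severity", "high")]
  else if a then [("overall_risk_label", "Adjust Dosage"), ("overall_severity", sevName m)]
  else [("overall_risk_label", "Safe"), ("overall_severity", sevName m)]

lemma sevCode_bounds (r : List (String × String)) : 0 ≤ sevCode r ∧ sevCode r ≤ 4 := by
  unfold sevCode
  generalize dictGetD r "severity" "none" = x
  by_cases h : x ∈ SEV_B
  · rcases (by simpa [SEV_B] using h :
        x = "none" ∨ x = "low" ∨ x = "moderate" ∨ x = "high" ∨ x = "critical") with rfl|rfl|rfl|rfl|rfl <;> simp [h] <;> decide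
  · simp [h]

lemma summary_eq (r : List (String × String)) :
    summary_B r = render (isTox r) (isAdj r) (sevCode r) := by
  unfold summary_B render isTox isAdj sevCode sevName
  by_cases hT : dictGetD r "risk_label" "" = "Toxic"
  · simp [hT]
  · have hT' : (dictGetD r "risk_label" "" == "Toxic") = false := by simp [hT]
    generalize dictGetD r "severity" "none" = x
    by_cases h : x ∈ SEV_B
    · rcases (by simpa [SEV_B] using h :
          x = "none" ∨ x = "low" ∨ x = "moderate" ∨ x = "high" ∨ x = "critical") with rfl|rfl|rfl|rfl|rfl <;>
        by_cases hA : dictGetD r "risk_label" "" = "Adjust Dosage" <;> simp [hT', hA, h] <;> decide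
    · by_cases hA : dictGetD r "risk_label" "" = "Adjust Dosage" <;> simp [hT', hA, h] <;> decide

lemma merge_render (t1 a1 t2 a2 : Bool) (m1 m2 : Int)
    (h1 : 0 ≤ m1 ∧ m1 ≤ 4) (h2 : 0 ≤ m2 ∧ m2 ≤ 4) :
    merge_B (render t1 a1 m1) (render t2 a2 m2) = render (t1 || t2) (a1 || a2) (max m1 m2) := by
  obtain ⟨l1, u1⟩ := h1
  obtain ⟨l2, u2⟩ := h2
  cases t1 <;> cases t2 <;> cases a1 <;> cases a2 <;>
    simp [merge_B, render, dictGetD, rank_B] <;>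
    interval_cases m1 <;> interval_cases m2 <;> decide

lemma mcL_bounds (l : List (List (String × String))) : 0 ≤ mcL l ∧ mcL l ≤ 4 := by
  unfold mcL
  suffices h : ∀ m : Int, 0 ≤ m → m ≤ 4 → 0 ≤ (l.map sevCode).foldl max m ∧ (l.map sevCode).foldl max m ≤ 4 from
    h 0 (by norm_num) (by norm_num)
  induction l with
  | nil => intro m h0 h4; exact ⟨h0, h4⟩
  | cons r l ih =>
    intro m h0 h4
    simp only [List.map_cons, List.foldl_cons]
    exact ih _ (le_max_of_le_left h0) (max_le h4 (sevCode_bounds r).2)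

lemma foldl_max_shift (xs : List Int) (m n : Int) :
    xs.foldl max (max m n) = max m (xs.foldl max n) := by
  induction xs generalizing n with
  | nil => rfl
  | cons x xs ih => simp only [List.foldl_cons, max_assoc, ih]

lemma mcL_append (a b : List (List (String × String))) :
    mcL (a ++ b) = max (mcL a) (mcL b) := by
  have hb : 0 ≤ mcL a := (mcL_bounds a).1
  unfold mcL at hb ⊢
  rw [List.map_append, List.foldl_append]
  have h := foldl_max_shift (b.map sevCode) ((a.map sevCode).foldl max 0) 0
  rw [max_eq_left hb] at h
  exact h

lemma solve_eq (l : List (List (String × String))) :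
    solve_B l = render (toxL l) (adjL l) (mcL l) := by
  induction l using solve_B.induct with
  | case1 => rw [solve_B]; decide
  | case2 r =>
    rw [solve_B]
    simp only [toxL, adjL, mcL, List.any_cons, List.any_nil, Bool.or_false,
      List.map_cons, List.map_nil, List.foldl_cons, List.foldl_nil]
    rw [max_eq_right (sevCode_bounds r).1]
    exact summary_eq r
  | case3 r1 r2 rest c mid ih1 ih2 =>
    rw [solve_B]
    show merge_B (solve_B (c.take mid)) (solve_B (c.drop mid)) = render (toxL c) (adjL c) (mcL c)
    rw [ih1, ih2, merge_render _ _ _ _ _ _ (mcL_bounds _) (mcL_bounds _)]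
    have hsplit : c.take mid ++ c.drop mid = c := List.take_append_drop _ _
    rw [← mcL_append, hsplit]
    unfold toxL adjL
    conv_rhs => rw [← hsplit]
    rw [List.any_append, List.any_append, hsplit]

-- A-side lemmas: characterise the accumulating loop
lemma vrl_toxic (x : String) : (validate_risk_label x == "Toxic") = (x == "Toxic") := by
  unfold validate_risk_label
  by_cases h : x ∈ VALID_RISK_LABELS
  · simp [h]
  · have hx : x ≠ "Toxic" := by rintro rfl; exact h (by decide)
    simp [h, hx]

lemma vrl_adjust (x : String) : (validate_risk_label x == "Adjust Dosage") = (x == "Adjust Dosage") := by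
  unfold validate_risk_label
  by_cases h : x ∈ VALID_RISK_LABELS
  · simp [h]
  · have hx : x ≠ "Adjust Dosage" := by rintro rfl; exact h (by decide)
    simp [h, hx]

lemma vs_contains (x : String) : PySem.Dict.contains severity_map_A (validate_severity x) = true := by
  unfold validate_severity
  by_cases h : x ∈ VALID_SEVERITY_LEVELS
  · rw [if_pos (show VALID_SEVERITY_LEVELS.contains x = true by simpa using h)]
    rcases (by simpa [VALID_SEVERITY_LEVELS, PySem.Set.mem_ofList] using h :
        x = "none" ∨ x = "low" ∨ x = "moderate" ∨ x = "high" ∨ x = "critical") with rfl | rfl | rfl | rfl | rfl <;> decide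
  · rw [if_neg (show ¬VALID_SEVERITY_LEVELS.contains x = true by simpa using h)]; decide

lemma vs_getD (x : String) :
    PySem.Dict.getD severity_map_A (validate_severity x) 0
      = (PySem.List.index? SEV_B (if SEV_B.contains x then x else "none")).getD 0 := by
  unfold validate_severity
  by_cases h : x ∈ VALID_SEVERITY_LEVELS
  · have hc : VALID_SEVERITY_LEVELS.contains x = true := by simpa using h
    rw [if_pos hc]
    rcases (by simpa [VALID_SEVERITY_LEVELS, PySem.Set.mem_ofList] using h :
        x = "none" ∨ x = "low" ∨ x = "moderate" ∨ x = "high" ∨ x = "critical") with rfl|rfl|rfl|rfl|rfl <;> decide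
  · have hc : ¬ VALID_SEVERITY_LEVELS.contains x = true := by simpa using h
    rw [if_neg hc]
    have h1 : x ≠ "none" := by rintro rfl; exact h (by decide)
    have h2 : x ≠ "low" := by rintro rfl; exact h (by decide)
    have h3 : x ≠ "moderate" := by rintro rfl; exact h (by decide)
    have h4 : x ≠ "high" := by rintro rfl; exact h (by decide)
    have h5 : x ≠ "critical" := by rintro rfl; exact h (by decide)
    have hnc : SEV_B.contains x = false := by
      simp [SEV_B, h1, h2, h3, h4, h5]
    rw [hnc]; simp; decide

-- A's loop body, simplified to three independent updates
lemma stepA (r : List (String × String)) (t a : Bool) (m : Int) :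
    (let risk_label := validate_risk_label (dictGetD r "risk_label" "")
     let sev := validate_severity (dictGetD r "severity" "none")
     let st :=
       if risk_label == "Toxic" then (true, (t, a, m).2.1, (t, a, m).2.2)
       else if risk_label == "Adjust Dosage" then ((t, a, m).1, true, (t, a, m).2.2)
       else (t, a, m)
     if PySem.Dict.contains severity_map_A sev then
       (st.1, st.2.1, max st.2.2 (PySem.Dict.getD severity_map_A sev 0))
     else st)
    = (t || isTox r, a || isAdj r, max m (sevCode r)) := by
  simp only [vs_contains, if_true, vrl_toxic, vrl_adjust, vs_getD]
  by_cases hT : dictGetD r "risk_label" "" = "Toxic"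
  · simp [hT, isTox, isAdj, sevCode]
  · by_cases hA : dictGetD r "risk_label" "" = "Adjust Dosage"
    · simp [hA, isTox, isAdj, sevCode]
    · simp [hT, hA, isTox, isAdj, sevCode]

-- A's whole loop, characterised: three independent accumulators
lemma loopA (l : List (List (String × String))) (t a : Bool) (m : Int) :
    l.foldl (fun (st : Bool × Bool × Int) result =>
      let risk_label := validate_risk_label (dictGetD result "risk_label" "")
      let sev := validate_severity (dictGetD result "severity" "none")
      let st :=
        if risk_label == "Toxic" then (true, st.2.1, st.2.2)
        else if risk_label == "Adjust Dosage" then (st.1, true, st.2.2)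
        else st
      if PySem.Dict.contains severity_map_A sev then
        (st.1, st.2.1, max st.2.2 (PySem.Dict.getD severity_map_A sev 0))
      else st) (t, a, m)
    = (t || l.any isTox, a || l.any isAdj, (l.map sevCode).foldl max m) := by
  induction l generalizing t a m with
  | nil => simp
  | cons r l ih =>
    simp only [List.foldl_cons, List.map_cons, List.any_cons]
    rw [stepA, ih]
    simp [Bool.or_assoc]

lemma labels_eq (M : Int) (h0 : 0 ≤ M) (h4 : M ≤ 4) (d : String) :
    PySem.Dict.getD severity_labels_A M d = sevName M := by
  interval_cases M <;> rfl

-- ===== VERDICT (by name: the statement is the Claim_ definition above) =====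
theorem determine_overall_risk_spec : Claim_equal_determine_overall_risk := by
  intro l _
  unfold Spec_determine_overall_risk determine_overall_risk determine_overall_risk_alt
  rw [loopA]
  cases l with
  | nil => decide
  | cons r rest =>
    rw [if_neg (by simp : ¬((r :: rest).isEmpty = true)), solve_eq]
    simp only [Bool.false_or]
    have hb := mcL_bounds (r :: rest)
    have hM : ((r :: rest).map sevCode).foldl max 0 = mcL (r :: rest) := rfl
    rw [hM]
    unfold render toxL adjL
    by_cases hT : (r :: rest).any isTox
    · simp [hT]
    · by_cases hA : (r :: rest).any isAdj
      · simp only [hT, hA, Bool.false_eq_true, if_false, if_true]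
        rw [labels_eq _ hb.1 hb.2]
      · simp only [hT, hA, Bool.false_eq_true, if_false]
        rw [labels_eq _ hb.1 hb.2]
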